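-- pv_equiv track=rewrite | github.com/flaraloza123/holberton-system_engineering-devops-1 | 0x16-api_advanced/100-count.py | count
-- ===== SOURCE A (Python) =====
-- def count(_dict, word_list, sentence):
--     ''' count words in a sentence from a given list'''
--     for s in sentence:
--         if s in set([x.lower() for x in word_list]):
--             if _dict.get(s):
--                 _dict[s] += 1
--             else:
--                 _dict[s] = 1
--     return _dict
-- ===== SOURCE B (Python) =====
-- def count(_dict, word_list, sentence):
--     ''' count words in a sentence from a given list'''
--     words = {w.lower() for w in word_list}
--     for c in dict.fromkeys(sentence):
--         if c in words:
--             _dict[c] = _dict.get(c, 0) + sentence.count(c)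
--     return _dict
-- ===== Notes on version B (the rewrite author's own statement) =====
-- stated objective: faster
-- what changed: A scans the sentence character by character, rebuilding the lowercased word set for every character and updating _dict with a truthiness branch; B builds the set once, then iterates over the DISTINCT characters of the sentence (dict.fromkeys order) and for each matching one adds sentence.count(c) to _dict in a single arithmetic update.
import Mathlib
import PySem

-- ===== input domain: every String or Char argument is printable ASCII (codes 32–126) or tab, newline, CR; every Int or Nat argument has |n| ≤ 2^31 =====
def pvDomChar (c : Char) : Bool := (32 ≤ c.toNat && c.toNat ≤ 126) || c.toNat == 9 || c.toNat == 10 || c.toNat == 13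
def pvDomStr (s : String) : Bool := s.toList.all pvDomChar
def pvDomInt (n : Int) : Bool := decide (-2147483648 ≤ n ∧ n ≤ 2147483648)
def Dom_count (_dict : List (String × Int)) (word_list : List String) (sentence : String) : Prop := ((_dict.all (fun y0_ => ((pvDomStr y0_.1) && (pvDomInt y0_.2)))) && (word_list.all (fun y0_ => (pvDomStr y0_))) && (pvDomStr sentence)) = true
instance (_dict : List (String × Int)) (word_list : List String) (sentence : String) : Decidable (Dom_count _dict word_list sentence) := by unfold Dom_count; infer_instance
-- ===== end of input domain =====

-- B builds the lowercased word set once and then loops over the DISTINCT sentence characters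
-- (first-occurrence order), adding sentence.count(c) per matched character, instead of A's
-- per-character tally that rebuilds the set each step; proved to return the same dict.
-- Both Pythons mutate _dict in place (same mutation); the theorems are about the return value.

-- ===== PORT A =====
def count (_dict : List (String × Int)) (word_list : List String) (sentence : String) : List (String × Int) :=
  (sentence.toList.foldl
    (fun d c =>
      let s := String.ofList [c]
      if PySem.Set.contains (PySem.Set.ofList (word_list.map PySem.Str.lower)) s then
        match d.get? s with
        | some v => if v ≠ 0 then d.insert s (v + 1) else d.insert s 1
        | none => d.insert s 1
      else d)
    (PySem.Dict.ofList _dict)).items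

-- ===== PORT B =====
def count_alt (_dict : List (String × Int)) (word_list : List String) (sentence : String) : List (String × Int) :=
  let words : PySem.Set String := PySem.Set.ofList (word_list.map PySem.Str.lower)
  ((PySem.List.dedup sentence.toList).foldl
    (fun d c =>
      let s := String.ofList [c]
      if words.contains s then
        d.insert s (d.getD s 0 + (PySem.Str.count sentence s : Int))
      else d)
    (PySem.Dict.ofList _dict)).items

-- ===== PRECONDITION & SPEC =====
def Spec_count (_dict : List (String × Int)) (word_list : List String) (sentence : String) (out : List (String × Int)) : Prop := out = count_alt _dict word_list sentence
instance (_dict : List (String × Int)) (word_list : List String) (sentence : String) (out : List (String × Int)) : Decidable (Spec_count _dict word_list sentence out) := by unfold Spec_count; infer_instance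

-- ===== CLAIM (what is proved, stated in full; the proofs are below) =====
def Claim_equal_count : Prop := ∀ (_dict : List (String × Int)) (word_list : List String) (sentence : String), Dom_count _dict word_list sentence → Spec_count _dict word_list sentence (count _dict word_list sentence)

-- ===== LEMMAS AND PROOFS =====

-- the key map: a character as the 1-character string it indexes _dict with
def pvKf (c : Char) : String := String.ofList [c]

theorem pvKf_injective : Function.Injective pvKf := by
  intro a b h
  have := congrArg String.toList h
  simpa [pvKf] using this

-- counting a single-character pattern is counting the character
theorem countgo_singleton (c : Char) (fuel : Nat) :
    ∀ (l : List Char) (acc : Nat), l.length ≤ fuel →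
      PySem.Chars.count.go [c] fuel l acc = acc + l.count c := by
  induction fuel with
  | zero =>
    intro l acc h
    have : l = [] := List.eq_nil_of_length_eq_zero (Nat.le_zero.mp h)
    subst this
    simp [PySem.Chars.count.go]
  | succ n ih =>
    intro l acc h
    cases l with
    | nil => simp [PySem.Chars.count.go]
    | cons hd t =>
      simp only [PySem.Chars.count.go, List.isPrefixOf]
      by_cases hc : c = hd
      · subst hc
        simp only [BEq.rfl, Bool.true_and, if_true]
        rw [List.length_singleton, List.drop_one, List.tail_cons]
        rw [ih t (acc + 1) (by simpa using h)]
        simp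
        omega
      · have hbeq : (c == hd) = false := beq_false_of_ne hc
        simp only [hbeq, Bool.false_and]
        rw [ih t acc (by simpa using h)]
        simp [Ne.symm hc]

theorem count_singleton (s : List Char) (c : Char) :
    PySem.Chars.count s [c] = s.count c := by
  rw [PySem.Chars.count]
  simp only [List.isEmpty_cons]
  simpa using countgo_singleton c s.length s 0 le_rfl

-- A's branchy update is always "insert (old + 1)" on ints (0 is falsy and 0 + 1 = 1).
theorem astep_eq (d : PySem.Dict String Int) (s : String) :
    (match d.get? s with
      | some v => if v ≠ 0 then d.insert s (v + 1) else d.insert s 1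
      | none => d.insert s 1)
    = d.insert s (d.getD s 0 + 1) := by
  cases h : d.get? s with
  | none =>
    rw [PySem.Dict.getD_of_get?_eq_none _ _ h]
    simp
  | some v =>
    rw [PySem.Dict.getD_of_get?_eq_some _ _ h]
    by_cases hv : v = 0 <;> simp [hv]

-- a conditional tally loop is the plain tally loop over the filtered, key-mapped list
theorem cond_foldl (p : Char → Bool) (l : List Char)
    (d0 : PySem.Dict String Int) :
    l.foldl (fun d c => if p c then d.insert (pvKf c) (d.getD (pvKf c) 0 + 1) else d) d0
      = ((l.filter p).map pvKf).foldl (fun d s => d.insert s (d.getD s 0 + 1)) d0 := by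
  rw [PySem.List.foldl_if_eq_foldl_filter, List.foldl_map]

-- discard commutes with filter (both are filters)
theorem discard_filter (p : Char → Bool) (s : List Char) (c : Char) :
    PySem.Set.discard (s.filter p) c = (PySem.Set.discard s c).filter p := by
  simp only [PySem.Set.discard, List.filter_filter]
  exact List.filter_congr (fun x _ => Bool.and_comm _ _)

-- dedup commutes with filter
theorem dedup_filter (p : Char → Bool) (l : List Char) :
    PySem.List.dedup (l.filter p) = (PySem.List.dedup l).filter p := by
  simp only [PySem.List.dedup_eq_ofList]
  induction l with
  | nil => rfl
  | cons c t ih =>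
    by_cases hc : p c
    · simp only [List.filter_cons, hc, if_true, PySem.Set.ofList_cons, ih, discard_filter]
    · simp only [List.filter_cons, hc, Bool.false_eq_true, if_false, PySem.Set.ofList_cons]
      rw [ih, ← discard_filter]
      have heq : PySem.Set.discard ((PySem.Set.ofList t).filter p) c
          = (PySem.Set.ofList t).filter p := by
        simp only [PySem.Set.discard]
        apply List.filter_eq_self.mpr
        intro x hx
        have hpx : p x = true := List.of_mem_filter hx
        have hne : x ≠ c := fun h => by subst h; simp [hpx] at hc
        simpa using hne
      rw [heq]

-- set-of-a-mapped-list for an injective map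
theorem ofList_map_inj (l : List Char) :
    PySem.Set.ofList (l.map pvKf) = (PySem.Set.ofList l).map pvKf := by
  induction l with
  | nil => rfl
  | cons c t ih =>
    simp only [List.map_cons, PySem.Set.ofList_cons, ih, PySem.Set.discard, List.filter_map]
    congr 1
    refine congrArg (List.map pvKf) (List.filter_congr ?_)
    intro x _
    simp [pvKf_injective.eq_iff]

-- updating a set with the dedup of a list is updating it with the list
theorem update_ofList (s : PySem.Set String) (xs : List String) :
    PySem.Set.update s (PySem.Set.ofList xs) = PySem.Set.update s xs := by
  rw [PySem.Set.update_eq_append_filter, PySem.Set.update_eq_append_filter,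
    PySem.Set.ofList_ofList]

-- value of the merge loop: each pair adds its second component at its key
theorem getD_merge (ps : List (String × Int)) (d : PySem.Dict String Int) (v : String) :
    (ps.foldl (fun d p => d.insert p.1 (d.getD p.1 0 + p.2)) d).getD v 0
      = d.getD v 0 + ((ps.filter (fun p => p.1 == v)).map (·.2)).sum := by
  induction ps generalizing d with
  | nil => simp
  | cons q t ih =>
    by_cases hq : q.1 = v
    · subst hq
      simp [List.foldl_cons, ih, PySem.Dict.getD_insert_self]
      ring
    · rw [List.foldl_cons, ih, PySem.Dict.getD_insert_of_ne _ _ _ (Ne.symm hq)]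
      simp [hq]

-- the per-distinct-character counts sum to the occurrence count of the key
theorem sum_dedup_count (M : List Char) (v : String) :
    ((((PySem.List.dedup M).filter (fun c => pvKf c == v)).map (fun c => (M.count c : Int))).sum)
      = ((M.map pvKf).count v : Int) := by
  by_cases hv : ∃ c ∈ M, pvKf c = v
  · obtain ⟨c₀, hc₀, hkv⟩ := hv
    have hfc : (PySem.List.dedup M).filter (fun c => pvKf c == v)
        = (PySem.List.dedup M).filter (fun c => c == c₀) := by
      apply List.filter_congr
      intro x _
      subst hkv
      simp [pvKf_injective.eq_iff]
    have hcount1 : (PySem.List.dedup M).count c₀ = 1 :=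
      List.count_eq_one_of_mem (PySem.List.nodup_dedup M)
        ((PySem.List.mem_dedup M c₀).mpr hc₀)
    rw [hfc, List.filter_beq, hcount1]
    subst hkv
    rw [List.count_map_of_injective M pvKf pvKf_injective c₀]
    simp
  · push Not at hv
    have hf : (PySem.List.dedup M).filter (fun c => pvKf c == v) = [] := by
      apply List.filter_eq_nil_iff.mpr
      intro x hx
      simpa using hv x ((PySem.List.mem_dedup M x).mp hx)
    have hcz : (M.map pvKf).count v = 0 := by
      apply List.count_eq_zero.mpr
      intro hmem
      obtain ⟨c, hc, hkc⟩ := List.mem_map.mp hmem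
      exact hv c hc hkc
    rw [hf, hcz]
    simp

-- two dicts with equal Nodup key lists and equal lookups are equal
theorem dict_eq_of_keys_getD (d1 d2 : PySem.Dict String Int)
    (h1 : d1.keys.Nodup) (h2 : d2.keys.Nodup)
    (hk : d1.keys = d2.keys) (hg : ∀ v, d1.getD v 0 = d2.getD v 0) : d1 = d2 := by
  apply PySem.Dict.ext
  rw [PySem.Dict.items_eq_map_keys _ h1 (0 : Int),
    PySem.Dict.items_eq_map_keys _ h2 (0 : Int), hk]
  exact List.map_congr_left (fun v _ => by rw [hg])

-- CORE: tallying every occurrence equals one insert per distinct character with its count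
theorem core (M : List Char) (d0 : PySem.Dict String Int) (hnd : d0.keys.Nodup) :
    (M.map pvKf).foldl (fun d s => d.insert s (d.getD s 0 + 1)) d0
      = (PySem.List.dedup M).foldl
          (fun d c => d.insert (pvKf c) (d.getD (pvKf c) 0 + (M.count c : Int))) d0 := by
  apply dict_eq_of_keys_getD
  · exact PySem.Dict.nodup_keys_foldl_insert _ _ _ hnd
  · exact PySem.Dict.nodup_keys_foldl_insert_key _ pvKf _ _ hnd
  · rw [PySem.Dict.keys_foldl_insert, PySem.Dict.keys_foldl_insert_key]
    have : (PySem.List.dedup M).map pvKf = PySem.Set.ofList (M.map pvKf) := by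
      rw [PySem.List.dedup_eq_ofList, ← ofList_map_inj]
    rw [this, update_ofList]
  · intro v
    rw [PySem.Dict.getD_foldl_insert_add_one]
    have hmap : (PySem.List.dedup M).foldl
        (fun d c => d.insert (pvKf c) (d.getD (pvKf c) 0 + (M.count c : Int))) d0
        = ((PySem.List.dedup M).map (fun c => (pvKf c, (M.count c : Int)))).foldl
            (fun d p => d.insert p.1 (d.getD p.1 0 + p.2)) d0 := by
      rw [List.foldl_map]
    rw [hmap, getD_merge]
    congr 1
    rw [List.filter_map, List.map_map]
    simpa using (sum_dedup_count M v).symm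

-- ===== VERDICT (by name: the statement is the Claim_ definition above) =====
theorem count_spec : Claim_equal_count := by
  intro _dict word_list sentence _
  unfold Spec_count count count_alt
  dsimp only
  set p : Char → Bool := fun c =>
    PySem.Set.contains (PySem.Set.ofList (word_list.map PySem.Str.lower)) (String.ofList [c])
    with hp
  -- A side: replace the branchy update, then fold over the filtered mapped list
  rw [PySem.List.foldl_congr_mem sentence.toList _
    (fun (d : PySem.Dict String Int) (c : Char) =>
      if p c then d.insert (pvKf c) (d.getD (pvKf c) 0 + 1) else d)
    (PySem.Dict.ofList _dict)
    (fun d c _ => by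
      dsimp only [hp, pvKf]
      split
      exacts [astep_eq d (String.ofList [c]), rfl])]
  rw [cond_foldl]
  -- B side: single-char counts are list counts; restrict to the filtered dedup
  rw [PySem.List.foldl_congr_mem (PySem.List.dedup sentence.toList) _
    (fun (d : PySem.Dict String Int) (c : Char) =>
      if p c then d.insert (pvKf c) (d.getD (pvKf c) 0 + (sentence.toList.count c : Int)) else d)
    (PySem.Dict.ofList _dict)
    (fun d c _ => by
      dsimp only [hp, pvKf]
      have : PySem.Str.count sentence (String.ofList [c]) = sentence.toList.count c := by
        simp [PySem.Str.count, count_singleton]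
      rw [this])]
  rw [PySem.List.foldl_if_eq_foldl_filter, ← dedup_filter]
  -- counts inside the filtered part agree with counts in the whole sentence
  rw [PySem.List.foldl_congr_mem (PySem.List.dedup (sentence.toList.filter p)) _
    (fun (d : PySem.Dict String Int) (c : Char) =>
      d.insert (pvKf c) (d.getD (pvKf c) 0 + ((sentence.toList.filter p).count c : Int)))
    (PySem.Dict.ofList _dict)
    (fun d c hc => by
      have hpc : p c = true := List.of_mem_filter ((PySem.List.mem_dedup _ c).mp hc)
      dsimp only
      rw [List.count_filter hpc])]
  exact congrArg PySem.Dict.items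
    (core (sentence.toList.filter p) (PySem.Dict.ofList _dict)
      (PySem.Dict.nodup_keys_ofList _dict))
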